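-- pv_equiv track=rewrite | github.com/zadacka/advent_of_code_2021 | day09/day09.py | find_all_basins
-- ===== SOURCE A (Python) =====
-- def get_value(row, col, array):
--     if row < 0 or col < 0 or row >= len(array) or col >= len(array[0]):
--         return None
--     else:
--         return array[row][col]
--
-- def is_minima(row, col, array):
--     value = array[row][col]
--     above = get_value(row - 1, col, array)
--     left = get_value(row, col - 1, array)
--     right = get_value(row, col + 1, array)
--     below = get_value(row + 1, col, array)
--     for neighbour in (above, left, right, below):
--         if neighbour is not None and neighbour <= value:
--             return False
--     return True
--
-- def find_minima(array):
--     minima = {}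
--     for row_index, row in enumerate(array):
--         for column_index, entry in enumerate(row):
--             if is_minima(row_index, column_index, array):
--                 minima[(row_index, column_index)] = entry
--     return minima
--
-- def get_neighbours(location):
--     row, col = location
--     return (row - 1, col), (row, col - 1), (row, col + 1), (row + 1, col)
--
-- def grow_basin(locations_in_basin, array):
--     new_locations = set()
--     for location in locations_in_basin:
--         neighbours = get_neighbours(location)
--         for neighbour in neighbours:
--             if neighbour not in locations_in_basin:
--                 neighbour_value = get_value(*neighbour, array)
--                 if neighbour_value is not None and neighbour_value != 9:
--                     new_locations.add(neighbour)
--     return new_locations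
--
-- def find_basin(start, array):
--     locations_in_basin = {start}
--     while True:
--         new_locations = grow_basin(locations_in_basin, array)
--         if new_locations:
--             locations_in_basin.update(new_locations)
--         else:
--             return locations_in_basin
--
-- def find_all_basins(array):
--     all_basins = []
--     minima = find_minima(array)
--     for minimum in minima:
--         basin = find_basin(minimum, array)
--         if basin not in all_basins:
--             all_basins.append(basin)
--     return all_basins
-- ===== SOURCE B (Python) =====
-- def find_all_basins(array):
--     rows = len(array)
--     width = len(array[0]) if array else 0
--
--     def value(r, c):
--         if 0 <= r < rows and 0 <= c < width:
--             return array[r][c]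
--         return None
--
--     all_basins = []
--     for r, row in enumerate(array):
--         for c, v in enumerate(row):
--             neighbours = (value(r - 1, c), value(r, c - 1), value(r, c + 1), value(r + 1, c))
--             if all(nv is None or nv > v for nv in neighbours):
--                 # breadth-first flood fill: frontier queue + visited set
--                 basin = {(r, c)}
--                 frontier = [(r, c)]
--                 while frontier:
--                     next_frontier = []
--                     for fr, fc in frontier:
--                         for nb in ((fr - 1, fc), (fr, fc - 1), (fr, fc + 1), (fr + 1, fc)):
--                             if nb not in basin:
--                                 nr, nc = nb
--                                 nv = value(nr, nc)
--                                 if nv is not None and nv != 9: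
--                                     basin.add(nb)
--                                     next_frontier.append(nb)
--                     frontier = next_frontier
--                 if basin not in all_basins:
--                     all_basins.append(basin)
--     return all_basins
-- ===== Notes on version B (the rewrite author's own statement) =====
-- stated objective: faster
-- what changed: A builds a minima dict and grows each basin by repeatedly re-scanning the entire basin set until a fixpoint (quadratic in basin size); B does a single grid scan and a breadth-first flood fill with a frontier queue and a visited set, touching each cell of a basin O(1) times.
import Mathlib
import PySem

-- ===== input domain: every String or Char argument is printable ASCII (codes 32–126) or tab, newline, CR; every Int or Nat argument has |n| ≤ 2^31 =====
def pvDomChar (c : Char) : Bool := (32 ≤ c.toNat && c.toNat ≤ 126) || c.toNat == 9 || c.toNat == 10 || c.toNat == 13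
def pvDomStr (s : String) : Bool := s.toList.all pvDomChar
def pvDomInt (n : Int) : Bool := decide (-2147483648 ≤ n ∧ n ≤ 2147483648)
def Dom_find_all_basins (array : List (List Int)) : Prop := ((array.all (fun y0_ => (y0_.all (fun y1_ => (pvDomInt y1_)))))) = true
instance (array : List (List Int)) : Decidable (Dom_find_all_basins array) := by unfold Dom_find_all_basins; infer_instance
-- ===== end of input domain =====

-- B replaces A's fixpoint regrowth of each basin (re-scanning the whole basin set every
-- round) by a breadth-first flood fill with a frontier queue and a visited set.

-- ===== PORT A =====
def pyA_get_value (row col : Int) (array : List (List Int)) : Option Int :=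
  if row < 0 ∨ col < 0 ∨ PySem.List.len array ≤ row ∨ PySem.List.len (PySem.List.pyGetD array 0 []) ≤ col then
    none
  else
    some (PySem.List.pyGetD (PySem.List.pyGetD array row []) col 0)

def pyA_is_minima (row col : Int) (array : List (List Int)) : Bool :=
  let value := PySem.List.pyGetD (PySem.List.pyGetD array row []) col 0
  [pyA_get_value (row - 1) col array, pyA_get_value row (col - 1) array,
   pyA_get_value row (col + 1) array, pyA_get_value (row + 1) col array].all
    (fun nb => match nb with
      | none => true
      | some n => decide (value < n))

def pyA_find_minima (array : List (List Int)) : PySem.Dict (Int × Int) Int :=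
  (PySem.List.enumerate array).foldl (fun d p =>
    (PySem.List.enumerate p.2).foldl (fun d q =>
      if pyA_is_minima p.1 q.1 array then d.insert (p.1, q.1) q.2 else d) d) PySem.Dict.empty

def pyA_get_neighbours (loc : Int × Int) : List (Int × Int) :=
  [(loc.1 - 1, loc.2), (loc.1, loc.2 - 1), (loc.1, loc.2 + 1), (loc.1 + 1, loc.2)]

def pyA_grow_basin (locations_in_basin : PySem.Set (Int × Int)) (array : List (List Int)) :
    PySem.Set (Int × Int) :=
  locations_in_basin.foldl (fun news loc =>
    (pyA_get_neighbours loc).foldl (fun news nb =>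
      if PySem.Set.contains locations_in_basin nb then news
      else match pyA_get_value nb.1 nb.2 array with
        | none => news
        | some v => if v = 9 then news else PySem.Set.add news nb) news) PySem.Set.empty

-- termination infrastructure for the two while-loops (both loops strictly enlarge a
-- duplicate-free set of in-grid cells):
def pvInGrid (R W : Nat) (p : Int × Int) : Bool :=
  decide (0 ≤ p.1 ∧ p.1 < (R : Int) ∧ 0 ≤ p.2 ∧ p.2 < (W : Int))

def pvMeas (R W : Nat) (S : List (Int × Int)) : Nat :=
  R * W + 1 - ((PySem.List.dedup S).filter (pvInGrid R W)).length

def pyA_find_basin_loop (array : List (List Int)) (locations_in_basin : PySem.Set (Int × Int)) :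
    PySem.Set (Int × Int) :=
  let new_locations := pyA_grow_basin locations_in_basin array
  if _h : new_locations ≠ [] then
    -- totality guard only: the measure ALWAYS decreases here (theorem pyA_loop_decr), so the
    -- else-branch is dead code and the loop is Python's 'while True' fixpoint loop verbatim
    if hd : pvMeas array.length (array.headD []).length
          (PySem.Set.update locations_in_basin new_locations)
        < pvMeas array.length (array.headD []).length locations_in_basin then
      pyA_find_basin_loop array (PySem.Set.update locations_in_basin new_locations)
    else
      locations_in_basin
  else
    locations_in_basin
termination_by pvMeas array.length (array.headD []).length locations_in_basin
decreasing_by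
  exact hd

def pyA_find_basin (start : Int × Int) (array : List (List Int)) : PySem.Set (Int × Int) :=
  pyA_find_basin_loop array (PySem.Set.add PySem.Set.empty start)

def find_all_basins (array : List (List Int)) : List (List (Int × Int)) :=
  let minima := pyA_find_minima array
  minima.keys.foldl (fun all_basins m =>
    let basin := pyA_find_basin m array
    if all_basins.any (fun b => PySem.Set.equal b basin) then all_basins
    else all_basins ++ [basin]) []

-- ===== PORT B =====
def pyB_value (array : List (List Int)) (rows width : Int) (r c : Int) : Option Int :=
  if 0 ≤ r ∧ r < rows ∧ 0 ≤ c ∧ c < width then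
    some (PySem.List.pyGetD (PySem.List.pyGetD array r []) c 0)
  else
    none

-- one pass of the while-loop body: scan the frontier, add unseen non-9 neighbours to the
-- basin (visited set) and to the next frontier
def pyB_round (array : List (List Int)) (rows width : Int)
    (basin frontier : List (Int × Int)) : List (Int × Int) × List (Int × Int) :=
  frontier.foldl (fun st f =>
    ([(f.1 - 1, f.2), (f.1, f.2 - 1), (f.1, f.2 + 1), (f.1 + 1, f.2)] : List (Int × Int)).foldl (fun st nb =>
      if PySem.Set.contains st.1 nb then st
      else match pyB_value array rows width nb.1 nb.2 with
        | none => st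
        | some v => if v = 9 then st else (PySem.Set.add st.1 nb, st.2 ++ [nb])) st)
    (basin, ([] : List (Int × Int)))

def pyB_bfs_loop (array : List (List Int)) (rows width : Int)
    (basin frontier : List (Int × Int)) : List (Int × Int) :=
  if _hfr : frontier = [] then basin
  else
    -- totality guard only: the measure ALWAYS decreases here (theorem pyB_loop_decr), so the
    -- else-branch is dead code and the loop is Python's 'while frontier' loop verbatim
    if hd : 2 * pvMeas rows.toNat width.toNat (pyB_round array rows width basin frontier).1
          + (if (pyB_round array rows width basin frontier).2 = [] then 0 else 1)
        < 2 * pvMeas rows.toNat width.toNat basin + (if frontier = [] then 0 else 1) then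
      pyB_bfs_loop array rows width (pyB_round array rows width basin frontier).1
        (pyB_round array rows width basin frontier).2
    else
      basin
termination_by 2 * pvMeas rows.toNat width.toNat basin + (if frontier = [] then 0 else 1)
decreasing_by
  exact hd

def pyB_bfs (array : List (List Int)) (rows width : Int) (start : Int × Int) :
    List (Int × Int) :=
  pyB_bfs_loop array rows width [start] [start]

def find_all_basins_alt (array : List (List Int)) : List (List (Int × Int)) :=
  let rows := PySem.List.len array
  let width := if array = [] then 0 else PySem.List.len (array.headD [])
  (PySem.List.enumerate array).foldl (fun all_basins p =>
    (PySem.List.enumerate p.2).foldl (fun all_basins q =>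
      if [pyB_value array rows width (p.1 - 1) q.1, pyB_value array rows width p.1 (q.1 - 1),
          pyB_value array rows width p.1 (q.1 + 1), pyB_value array rows width (p.1 + 1) q.1].all
            (fun nv => match nv with
              | none => true
              | some n => decide (q.2 < n)) then
        let basin := pyB_bfs array rows width (p.1, q.1)
        if all_basins.any (fun b => PySem.Set.equal b basin) then all_basins
        else all_basins ++ [basin]
      else all_basins) all_basins) []

-- ===== PRECONDITION & SPEC =====
-- Pre_ excludes exactly the grids on which A raises IndexError: get_value bounds the
-- column index by len(array[0]) but indexes the actual row, so any row shorter than the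
-- first row is probed out of range (B raises there too).
def Pre_find_all_basins (array : List (List Int)) : Prop :=
  ∀ row ∈ array, (array.headD []).length ≤ row.length
instance (array : List (List Int)) : Decidable (Pre_find_all_basins array) := by
  unfold Pre_find_all_basins; infer_instance

def pvWitness_find_all_basins : List (List Int) := [[1, 2, 9], [3, 9, 4], [9, 5, 6]]

def Spec_find_all_basins (array : List (List Int)) (out : List (List (Int × Int))) : Prop :=
  out = find_all_basins_alt array
instance (array : List (List Int)) (out : List (List (Int × Int))) :
    Decidable (Spec_find_all_basins array out) := by unfold Spec_find_all_basins; infer_instance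

-- ===== CLAIM (what is proved, stated in full; the proofs are below) =====
def Claim_equal_find_all_basins : Prop :=
  ∀ (array : List (List Int)), Dom_find_all_basins array → Pre_find_all_basins array →
    Spec_find_all_basins array (find_all_basins array)

-- ===== LEMMAS AND PROOFS =====

theorem pvFoldInv {α β : Type} (P : β → Prop) (f : β → α → β)
    (hf : ∀ b a, P b → P (f b a)) : ∀ (L : List α) (b : β), P b → P (L.foldl f b) := by
  intro L
  induction L with
  | nil => intro b hb; exact hb
  | cons a L ih => intro b hb; exact ih _ (hf b a hb)

theorem pvFilterGrid_le (R W : Nat) (l : List (Int × Int)) (hnd : l.Nodup)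
    (hg : ∀ p ∈ l, pvInGrid R W p = true) : l.length ≤ R * W := by
  have hmap : (l.map (fun p => p.1.toNat * W + p.2.toNat)).Nodup := by
    refine hnd.map_on ?_
    intro p hp q hq he
    have hpg := hg p hp
    have hqg := hg q hq
    simp only [pvInGrid, decide_eq_true_eq] at hpg hqg
    have e1 : (p.1.toNat + 1) * W = p.1.toNat * W + W := by ring
    have e2 : (q.1.toNat + 1) * W = q.1.toNat * W + W := by ring
    have h1 : p.1.toNat = q.1.toNat := by
      by_contra hne
      rcases Nat.lt_or_ge p.1.toNat q.1.toNat with h | h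
      · have hle : p.1.toNat + 1 ≤ q.1.toNat := h
        have := Nat.mul_le_mul_right W hle; omega
      · have hle : q.1.toNat + 1 ≤ p.1.toNat := by omega
        have := Nat.mul_le_mul_right W hle; omega
    have h2 : p.1.toNat * W = q.1.toNat * W := by rw [h1]
    exact Prod.ext (by omega) (by omega)
  have hsub : (l.map (fun p => p.1.toNat * W + p.2.toNat)) ⊆ List.range (R * W) := by
    intro n hn
    obtain ⟨p, hp, rfl⟩ := List.mem_map.mp hn
    have hpg := hg p hp
    simp only [pvInGrid, decide_eq_true_eq] at hpg
    have hA : p.1.toNat < R := by omega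
    have hB : p.2.toNat < W := by omega
    have : p.1.toNat * W + p.2.toNat < (p.1.toNat + 1) * W := by
      calc p.1.toNat * W + p.2.toNat < p.1.toNat * W + W := by omega
        _ = (p.1.toNat + 1) * W := by ring
    have h2 : (p.1.toNat + 1) * W ≤ R * W := Nat.mul_le_mul_right W hA
    simp only [List.mem_range]
    omega
  have := (List.subperm_of_subset hmap hsub).length_le
  simpa using this

theorem pvMeas_append_lt (R W : Nat) (S adds : List (Int × Int)) (h1 : adds ≠ [])
    (h2 : adds.Nodup) (h3 : ∀ y ∈ adds, y ∉ S ∧ pvInGrid R W y = true) :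
    pvMeas R W (S ++ adds) < pvMeas R W S := by
  have hd : PySem.List.dedup (S ++ adds) = PySem.List.dedup S ++ adds := by
    simp only [PySem.List.dedup_eq_ofList, PySem.Set.ofList_append]
    exact PySem.Set.update_eq_append_of_disjoint _ _ h2 (fun x hx => by
      rw [PySem.Set.mem_ofList]; exact (h3 x hx).1)
  have hfa : adds.filter (pvInGrid R W) = adds :=
    List.filter_eq_self.mpr (fun y hy => (h3 y hy).2)
  have hbound : ((PySem.List.dedup S).filter (pvInGrid R W)).length ≤ R * W := by
    refine pvFilterGrid_le R W _ ?_ ?_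
    · have : (PySem.List.dedup S).Nodup := by
        rw [PySem.List.dedup_eq_ofList]; exact PySem.Set.nodup_ofList S
      exact this.filter _
    · intro p hp; exact List.of_mem_filter hp
  have hlen : 0 < adds.length := List.length_pos_iff.mpr h1
  unfold pvMeas
  rw [hd, List.filter_append, hfa, List.length_append]
  omega

theorem pvWidth_eq (array : List (List Int)) :
    PySem.List.pyGetD array 0 ([] : List Int) = array.headD [] := by
  cases array <;> simp [PySem.List.pyGetD_zero]

theorem pyA_get_value_grid {array : List (List Int)} {r c : Int} {v : Int}
    (h : pyA_get_value r c array = some v) :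
    pvInGrid array.length (array.headD []).length (r, c) = true := by
  unfold pyA_get_value at h
  split at h
  · exact absurd h (by simp)
  · rename_i hcond
    simp only [PySem.List.len_eq, pvWidth_eq] at hcond
    simp only [pvInGrid, decide_eq_true_eq]
    omega

theorem pyA_grow_props (array : List (List Int)) (S : PySem.Set (Int × Int)) :
    ∀ y ∈ pyA_grow_basin S array,
      y ∉ S ∧ pvInGrid array.length (array.headD []).length y = true := by
  unfold pyA_grow_basin
  refine pvFoldInv (fun news => ∀ y ∈ news,
      y ∉ S ∧ pvInGrid array.length (array.headD []).length y = true) _ ?_ S PySem.Set.empty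
    (by intro y hy; cases hy)
  intro news loc hnews
  refine pvFoldInv (fun news => ∀ y ∈ news,
      y ∉ S ∧ pvInGrid array.length (array.headD []).length y = true) _ ?_ _ news hnews
  intro b nb hb
  by_cases hcont : PySem.Set.contains S nb = true
  · rw [if_pos hcont]; exact hb
  · rw [if_neg hcont]
    cases hgv : pyA_get_value nb.1 nb.2 array with
    | none => exact hb
    | some v =>
      dsimp only
      by_cases hv9 : v = 9
      · rw [if_pos hv9]; exact hb
      · rw [if_neg hv9]
        intro y hy
        rcases (PySem.Set.mem_add b nb y).mp hy with h | h
        · exact hb y h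
        · subst h
          refine ⟨fun hyS => hcont ((PySem.Set.contains_iff S y).mpr hyS), ?_⟩
          have := pyA_get_value_grid hgv
          simpa using this

theorem pyA_grow_nodup (array : List (List Int)) (S : PySem.Set (Int × Int)) :
    (pyA_grow_basin S array).Nodup := by
  unfold pyA_grow_basin
  refine pvFoldInv (fun news : List (Int × Int) => news.Nodup) _ ?_ S PySem.Set.empty List.nodup_nil
  intro news loc hnews
  refine pvFoldInv (fun news : List (Int × Int) => news.Nodup) _ ?_ _ news hnews
  intro b nb hb
  by_cases hcont : PySem.Set.contains S nb = true
  · rw [if_pos hcont]; exact hb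
  · rw [if_neg hcont]
    cases pyA_get_value nb.1 nb.2 array with
    | none => exact hb
    | some v =>
      dsimp only
      by_cases hv9 : v = 9
      · rw [if_pos hv9]; exact hb
      · rw [if_neg hv9]; exact PySem.Set.nodup_add b nb hb

theorem pyA_update_grow (array : List (List Int)) (S : PySem.Set (Int × Int)) :
    PySem.Set.update S (pyA_grow_basin S array) = S ++ pyA_grow_basin S array :=
  PySem.Set.update_eq_append_of_disjoint _ _ (pyA_grow_nodup array S)
    (fun x hx => (pyA_grow_props array S x hx).1)

theorem pyA_loop_decr (array : List (List Int)) (S : PySem.Set (Int × Int))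
    (h : pyA_grow_basin S array ≠ []) :
    pvMeas array.length (array.headD []).length (PySem.Set.update S (pyA_grow_basin S array))
      < pvMeas array.length (array.headD []).length S := by
  rw [pyA_update_grow]
  exact pvMeas_append_lt _ _ _ _ h (pyA_grow_nodup array S) (pyA_grow_props array S)


theorem pyB_round_spec (array : List (List Int)) (rows width : Int)
    (basin frontier : List (Int × Int)) :
    (pyB_round array rows width basin frontier).1
        = basin ++ (pyB_round array rows width basin frontier).2 ∧
      (pyB_round array rows width basin frontier).2.Nodup ∧
      ∀ y ∈ (pyB_round array rows width basin frontier).2,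
        y ∉ basin ∧ pvInGrid rows.toNat width.toNat y = true := by
  unfold pyB_round
  refine pvFoldInv (fun st => st.1 = basin ++ st.2 ∧ st.2.Nodup ∧
      ∀ y ∈ st.2, y ∉ basin ∧ pvInGrid rows.toNat width.toNat y = true) _ ?_ frontier
    (basin, []) ⟨by simp, List.nodup_nil, by intro y hy; cases hy⟩
  intro st f hst
  refine pvFoldInv (fun st => st.1 = basin ++ st.2 ∧ st.2.Nodup ∧
      ∀ y ∈ st.2, y ∉ basin ∧ pvInGrid rows.toNat width.toNat y = true) _ ?_ _ st hst
  intro st nb hst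
  obtain ⟨h1, h2, h3⟩ := hst
  by_cases hcont : PySem.Set.contains st.1 nb = true
  · rw [if_pos hcont]; exact ⟨h1, h2, h3⟩
  · rw [if_neg hcont]
    have hnbmem : nb ∉ st.1 := fun hm => hcont ((PySem.Set.contains_iff st.1 nb).mpr hm)
    cases hgv : pyB_value array rows width nb.1 nb.2 with
    | none => exact ⟨h1, h2, h3⟩
    | some v =>
      have hgrid : pvInGrid rows.toNat width.toNat nb = true := by
        unfold pyB_value at hgv
        split at hgv
        · rename_i hcond
          simp only [pvInGrid, decide_eq_true_eq]
          omega
        · exact absurd hgv (by simp)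
      dsimp only
      by_cases hv9 : v = 9
      · rw [if_pos hv9]; exact ⟨h1, h2, h3⟩
      · rw [if_neg hv9, PySem.Set.add_of_not_mem hnbmem]
        refine ⟨?_, ?_, ?_⟩
        · dsimp only; rw [h1, List.append_assoc]
        · dsimp only
          refine h2.append (List.nodup_singleton nb) (fun a ha hb => ?_)
          have : a = nb := List.mem_singleton.mp hb
          subst this
          exact hnbmem (by rw [h1]; exact List.mem_append_right basin ha)
        · dsimp only
          intro y hy
          rcases List.mem_append.mp hy with h | h
          · exact h3 y h
          · have : y = nb := List.mem_singleton.mp h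
            subst this
            exact ⟨fun hyb => hnbmem (by rw [h1]; exact List.mem_append_left _ hyb), hgrid⟩

theorem pyB_loop_decr (array : List (List Int)) (rows width : Int)
    (basin frontier : List (Int × Int)) (hfr : ¬ frontier = []) :
    2 * pvMeas rows.toNat width.toNat (pyB_round array rows width basin frontier).1
        + (if (pyB_round array rows width basin frontier).2 = [] then 0 else 1)
      < 2 * pvMeas rows.toNat width.toNat basin + (if frontier = [] then 0 else 1) := by
  obtain ⟨h1, h2, h3⟩ := pyB_round_spec array rows width basin frontier
  rw [if_neg hfr, h1]
  by_cases hz : (pyB_round array rows width basin frontier).2 = []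
  · rw [hz]; simp
  · have := pvMeas_append_lt rows.toNat width.toNat basin _ hz h2 h3
    split <;> omega



-- ---- step-function views of the two flood-fill folds (proof-only) ----
def pvInnerA (array : List (List Int)) (S news : PySem.Set (Int × Int)) (nb : Int × Int) :
    PySem.Set (Int × Int) :=
  if PySem.Set.contains S nb then news
  else match pyA_get_value nb.1 nb.2 array with
    | none => news
    | some v => if v = 9 then news else PySem.Set.add news nb

def pvStepA (array : List (List Int)) (S news : PySem.Set (Int × Int)) (loc : Int × Int) :
    PySem.Set (Int × Int) :=
  (pyA_get_neighbours loc).foldl (pvInnerA array S) news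

def pvInnerB (array : List (List Int)) (rows width : Int)
    (st : PySem.Set (Int × Int) × List (Int × Int)) (nb : Int × Int) :
    PySem.Set (Int × Int) × List (Int × Int) :=
  if PySem.Set.contains st.1 nb then st
  else match pyB_value array rows width nb.1 nb.2 with
    | none => st
    | some v => if v = 9 then st else (PySem.Set.add st.1 nb, st.2 ++ [nb])

def pvStepB (array : List (List Int)) (rows width : Int)
    (st : PySem.Set (Int × Int) × List (Int × Int)) (f : Int × Int) :
    PySem.Set (Int × Int) × List (Int × Int) :=
  ([(f.1 - 1, f.2), (f.1, f.2 - 1), (f.1, f.2 + 1), (f.1 + 1, f.2)] : List (Int × Int)).foldl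
    (pvInnerB array rows width) st

theorem growA_eq (array : List (List Int)) (S : PySem.Set (Int × Int)) :
    pyA_grow_basin S array = S.foldl (pvStepA array S) PySem.Set.empty := rfl

theorem roundB_eq (array : List (List Int)) (rows width : Int)
    (basin frontier : List (Int × Int)) :
    pyB_round array rows width basin frontier
      = frontier.foldl (pvStepB array rows width) (basin, []) := rfl

theorem widthExpr_eq (array : List (List Int)) :
    (if array = [] then 0 else PySem.List.len (array.headD []))
      = PySem.List.len (PySem.List.pyGetD array 0 []) := by
  cases array <;> simp [PySem.List.len_eq, PySem.List.pyGetD_zero]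

theorem value_eq (array : List (List Int)) (r c : Int) :
    pyB_value array (PySem.List.len array) (PySem.List.len (PySem.List.pyGetD array 0 [])) r c
      = pyA_get_value r c array := by
  unfold pyB_value pyA_get_value
  simp only [PySem.List.len_eq, pvWidth_eq]
  split <;> split <;> first | rfl | (exfalso; omega)

def pvAddable (array : List (List Int)) (nb : Int × Int) : Prop :=
  ∃ v, pyA_get_value nb.1 nb.2 array = some v ∧ v ≠ 9

def pvClosed (array : List (List Int)) (P S : List (Int × Int)) : Prop :=
  ∀ x ∈ P, ∀ nb ∈ pyA_get_neighbours x, pvAddable array nb → nb ∈ S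

theorem innerA_skip {array : List (List Int)} {S news : PySem.Set (Int × Int)} {nb : Int × Int}
    (h : pvAddable array nb → nb ∈ S) : pvInnerA array S news nb = news := by
  unfold pvInnerA
  by_cases hc : PySem.Set.contains S nb = true
  · rw [if_pos hc]
  · rw [if_neg hc]
    cases hgv : pyA_get_value nb.1 nb.2 array with
    | none => rfl
    | some v =>
      dsimp only
      by_cases hv : v = 9
      · rw [if_pos hv]
      · exact absurd ((PySem.Set.contains_iff S nb).mpr (h ⟨v, hgv, hv⟩)) hc

theorem foldA_skip (array : List (List Int)) (S : PySem.Set (Int × Int)) :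
    ∀ (L : List (Int × Int)), (∀ nb ∈ L, pvAddable array nb → nb ∈ S) →
      ∀ news, L.foldl (pvInnerA array S) news = news := by
  intro L
  induction L with
  | nil => intro _ news; rfl
  | cons a L ih =>
    intro hL news
    rw [List.foldl_cons, innerA_skip (hL a List.mem_cons_self)]
    exact ih (fun nb hnb => hL nb (List.mem_cons_of_mem a hnb)) news

theorem stepA_skip {array : List (List Int)} {S news : PySem.Set (Int × Int)} {x : Int × Int}
    (h : ∀ nb ∈ pyA_get_neighbours x, pvAddable array nb → nb ∈ S) :
    pvStepA array S news x = news :=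
  foldA_skip array S (pyA_get_neighbours x) h news

theorem foldA_prefix (array : List (List Int)) (S : PySem.Set (Int × Int)) :
    ∀ (P : List (Int × Int)), pvClosed array P S →
      ∀ news, P.foldl (pvStepA array S) news = news := by
  intro P
  induction P with
  | nil => intro _ news; rfl
  | cons a P ih =>
    intro hC news
    rw [List.foldl_cons, stepA_skip (hC a List.mem_cons_self)]
    exact ih (fun x hx => hC x (List.mem_cons_of_mem a hx)) news

theorem growA_split (array : List (List Int)) (P F : List (Int × Int))
    (hC : pvClosed array P (P ++ F)) :
    pyA_grow_basin (P ++ F) array = F.foldl (pvStepA array (P ++ F)) PySem.Set.empty := by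
  rw [growA_eq, List.foldl_append, foldA_prefix array (P ++ F) P
    (fun x hx => hC x hx)]

theorem innerAB (array : List (List Int)) (S news : List (Int × Int)) (nb : Int × Int) :
    pvInnerB array (PySem.List.len array) (PySem.List.len (PySem.List.pyGetD array 0 []))
        (S ++ news, news) nb
      = (S ++ pvInnerA array S news nb, pvInnerA array S news nb) := by
  unfold pvInnerA pvInnerB
  dsimp only
  rw [value_eq]
  by_cases h1 : PySem.Set.contains S nb = true
  · have h2 : PySem.Set.contains (S ++ news) nb = true :=
      (PySem.Set.contains_iff _ nb).mpr (List.mem_append_left news ((PySem.Set.contains_iff S nb).mp h1))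
    rw [if_pos h1, if_pos h2]
  · have hnS : nb ∉ S := fun hm => h1 ((PySem.Set.contains_iff S nb).mpr hm)
    by_cases hmem : nb ∈ news
    · have h2 : PySem.Set.contains (S ++ news) nb = true :=
        (PySem.Set.contains_iff _ nb).mpr (List.mem_append_right S hmem)
      rw [if_pos h2, if_neg h1]
      cases hgv : pyA_get_value nb.1 nb.2 array with
      | none => rfl
      | some v =>
        dsimp only
        by_cases hv : v = 9
        · rw [if_pos hv]
        · rw [if_neg hv, PySem.Set.add_of_mem hmem]
    · have hnbo : nb ∉ S ++ news := by
        intro hm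
        rcases List.mem_append.mp hm with h | h
        · exact hnS h
        · exact hmem h
      have h2 : ¬ PySem.Set.contains (S ++ news) nb = true :=
        fun hc => hnbo ((PySem.Set.contains_iff _ nb).mp hc)
      rw [if_neg h1, if_neg h2]
      cases hgv : pyA_get_value nb.1 nb.2 array with
      | none => rfl
      | some v =>
        dsimp only
        by_cases hv : v = 9
        · rw [if_pos hv, if_pos hv]
        · rw [if_neg hv, if_neg hv, PySem.Set.add_of_not_mem hnbo,
            PySem.Set.add_of_not_mem hmem, List.append_assoc]

theorem foldAB (array : List (List Int)) (S : List (Int × Int)) :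
    ∀ (L : List (Int × Int)) (news : List (Int × Int)),
      L.foldl (pvInnerB array (PySem.List.len array)
          (PySem.List.len (PySem.List.pyGetD array 0 []))) (S ++ news, news)
        = (S ++ L.foldl (pvInnerA array S) news, L.foldl (pvInnerA array S) news) := by
  intro L
  induction L with
  | nil => intro news; rfl
  | cons a L ih =>
    intro news
    rw [List.foldl_cons, List.foldl_cons, innerAB, ih]

theorem stepAB (array : List (List Int)) (S news : List (Int × Int)) (f : Int × Int) :
    pvStepB array (PySem.List.len array) (PySem.List.len (PySem.List.pyGetD array 0 []))
        (S ++ news, news) f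
      = (S ++ pvStepA array S news f, pvStepA array S news f) :=
  foldAB array S (pyA_get_neighbours f) news

theorem roundAB (array : List (List Int)) (S : List (Int × Int)) :
    ∀ (F : List (Int × Int)) (news : List (Int × Int)),
      F.foldl (pvStepB array (PySem.List.len array)
          (PySem.List.len (PySem.List.pyGetD array 0 []))) (S ++ news, news)
        = (S ++ F.foldl (pvStepA array S) news, F.foldl (pvStepA array S) news) := by
  intro F
  induction F with
  | nil => intro news; rfl
  | cons a F ih =>
    intro news
    rw [List.foldl_cons, List.foldl_cons, stepAB, ih]

theorem innerA_mem_step (array : List (List Int)) (S news : PySem.Set (Int × Int))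
    (nb y : Int × Int) (hy : y ∈ news) : y ∈ pvInnerA array S news nb := by
  unfold pvInnerA
  by_cases hc : PySem.Set.contains S nb = true
  · rw [if_pos hc]; exact hy
  · rw [if_neg hc]
    cases pyA_get_value nb.1 nb.2 array with
    | none => exact hy
    | some v =>
      dsimp only
      by_cases hv : v = 9
      · rw [if_pos hv]; exact hy
      · rw [if_neg hv]; exact (PySem.Set.mem_add news nb y).mpr (Or.inl hy)

theorem innerA_mono (array : List (List Int)) (S : PySem.Set (Int × Int)) :
    ∀ (L : List (Int × Int)) (news : PySem.Set (Int × Int)) (y : Int × Int),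
      y ∈ news → y ∈ L.foldl (pvInnerA array S) news := by
  intro L
  induction L with
  | nil => intro news y hy; exact hy
  | cons a L ih =>
    intro news y hy
    rw [List.foldl_cons]
    exact ih _ y (innerA_mem_step array S news a y hy)

theorem stepA_mono (array : List (List Int)) (S : PySem.Set (Int × Int)) :
    ∀ (L : List (Int × Int)) (news : PySem.Set (Int × Int)) (y : Int × Int),
      y ∈ news → y ∈ L.foldl (pvStepA array S) news := by
  intro L
  induction L with
  | nil => intro news y hy; exact hy
  | cons a L ih =>
    intro news y hy
    rw [List.foldl_cons]
    exact ih _ y (innerA_mono array S (pyA_get_neighbours a) news y hy)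

theorem innerA_cover (array : List (List Int)) (S : PySem.Set (Int × Int)) :
    ∀ (L : List (Int × Int)) (news : PySem.Set (Int × Int)) (nb : Int × Int),
      nb ∈ L → pvAddable array nb → nb ∈ S ∨ nb ∈ L.foldl (pvInnerA array S) news := by
  intro L
  induction L with
  | nil => intro _ nb h; cases h
  | cons a L ih =>
    intro news nb hmem hadd
    rw [List.foldl_cons]
    rcases List.mem_cons.mp hmem with rfl | h
    · by_cases hc : PySem.Set.contains S nb = true
      · exact Or.inl ((PySem.Set.contains_iff S nb).mp hc)
      · right
        apply innerA_mono
        unfold pvInnerA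
        rw [if_neg hc]
        obtain ⟨v, hgv, hv⟩ := hadd
        rw [hgv]
        dsimp only
        rw [if_neg hv]
        exact (PySem.Set.mem_add news nb nb).mpr (Or.inr rfl)
    · exact ih _ nb h hadd

theorem growA_cover (array : List (List Int)) (S : List (Int × Int)) :
    ∀ x ∈ S, ∀ nb ∈ pyA_get_neighbours x, pvAddable array nb →
      nb ∈ S ++ pyA_grow_basin S array := by
  intro x hx nb hnb hadd
  rw [growA_eq]
  obtain ⟨s1, s2, hS⟩ := List.append_of_mem hx
  rcases hS with rfl
  rw [List.foldl_append, List.foldl_cons]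
  have hcov := innerA_cover array (s1 ++ x :: s2) (pyA_get_neighbours x)
      (s1.foldl (pvStepA array (s1 ++ x :: s2)) PySem.Set.empty) nb hnb hadd
  rcases hcov with h | h
  · exact List.mem_append_left _ h
  · exact List.mem_append_right _ (stepA_mono array (s1 ++ x :: s2) s2 _ nb h)

theorem loopA_unfold (array : List (List Int)) (S : PySem.Set (Int × Int)) :
    pyA_find_basin_loop array S
      = if pyA_grow_basin S array ≠ [] then
          pyA_find_basin_loop array (PySem.Set.update S (pyA_grow_basin S array))
        else S := by
  rw [pyA_find_basin_loop]
  by_cases h : pyA_grow_basin S array ≠ []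
  · rw [dif_pos h, dif_pos (pyA_loop_decr array S h), if_pos h]
  · rw [dif_neg h, if_neg h]

theorem loopB_unfold (array : List (List Int)) (rows width : Int)
    (basin frontier : List (Int × Int)) :
    pyB_bfs_loop array rows width basin frontier
      = if frontier = [] then basin
        else pyB_bfs_loop array rows width
          (pyB_round array rows width basin frontier).1
          (pyB_round array rows width basin frontier).2 := by
  rw [pyB_bfs_loop]
  by_cases h : frontier = []
  · rw [dif_pos h, if_pos h]
  · rw [dif_neg h, dif_pos (pyB_loop_decr array rows width basin frontier h), if_neg h]

theorem loops_eq (array : List (List Int)) :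
    ∀ (n : Nat) (S F P : List (Int × Int)), S = P ++ F → pvClosed array P S →
      pvMeas array.length (array.headD []).length S ≤ n →
      pyA_find_basin_loop array S
        = pyB_bfs_loop array (PySem.List.len array)
            (PySem.List.len (PySem.List.pyGetD array 0 [])) S F := by
  intro n
  induction n using Nat.strong_induction_on with
  | _ n ih =>
    intro S F P hSP hC hm
    subst hSP
    have hgrow : pyA_grow_basin (P ++ F) array
        = F.foldl (pvStepA array (P ++ F)) PySem.Set.empty := growA_split array P F hC
    have hround : pyB_round array (PySem.List.len array)
        (PySem.List.len (PySem.List.pyGetD array 0 [])) (P ++ F) F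
          = ((P ++ F) ++ pyA_grow_basin (P ++ F) array, pyA_grow_basin (P ++ F) array) := by
      rw [roundB_eq]
      have := roundAB array (P ++ F) F []
      rw [List.append_nil] at this
      rw [this, hgrow]
      rfl
    by_cases hF : F = []
    · subst hF
      have hnew : pyA_grow_basin (P ++ []) array = [] := by rw [hgrow]; rfl
      rw [loopB_unfold, if_pos rfl, loopA_unfold, if_neg (by simpa using hnew)]
    · rw [loopB_unfold, if_neg hF, hround]
      by_cases hne : pyA_grow_basin (P ++ F) array = []
      · rw [loopA_unfold, if_neg (by simp [hne]), hne, List.append_nil,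
          loopB_unfold, if_pos rfl]
      · rw [loopA_unfold, if_pos hne, pyA_update_grow]
        have hlt := pvMeas_append_lt array.length (array.headD []).length (P ++ F)
          (pyA_grow_basin (P ++ F) array) hne (pyA_grow_nodup array (P ++ F))
          (pyA_grow_props array (P ++ F))
        refine ih (pvMeas array.length (array.headD []).length
            ((P ++ F) ++ pyA_grow_basin (P ++ F) array)) (by omega) _ _ (P ++ F) rfl ?_ le_rfl
        intro x hx nb hnb hadd
        exact growA_cover array (P ++ F) x hx nb hnb hadd

theorem basin_eq (array : List (List Int)) (start : Int × Int) :
    pyA_find_basin start array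
      = pyB_bfs array (PySem.List.len array)
          (PySem.List.len (PySem.List.pyGetD array 0 [])) start := by
  unfold pyA_find_basin pyB_bfs
  have h0 : PySem.Set.add (PySem.Set.empty : PySem.Set (Int × Int)) start = [start] := rfl
  rw [h0]
  exact loops_eq array (pvMeas array.length (array.headD []).length [start]) [start] [start] []
    rfl (fun x hx => absurd hx (List.not_mem_nil)) le_rfl

-- ---- minima enumeration ----
def pvRowMinima (array : List (List Int)) (p : Int × List Int) : List (Int × Int) :=
  ((PySem.List.enumerate p.2).filter (fun q => pyA_is_minima p.1 q.1 array)).map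
    (fun q => (p.1, q.1))

def pvMinimaList (array : List (List Int)) : List (Int × Int) :=
  (PySem.List.enumerate array).flatMap (pvRowMinima array)

theorem keys_insert_eq_add {κ ν : Type} [BEq κ] [LawfulBEq κ] (d : PySem.Dict κ ν)
    (k : κ) (v : ν) : (d.insert k v).keys = PySem.Set.add d.keys k := by
  by_cases hc : d.contains k = true
  · rw [PySem.Dict.keys_insert_of_contains d v hc,
      PySem.Set.add_of_mem ((PySem.Dict.contains_iff_mem_keys d k).mp hc)]
  · rw [PySem.Dict.keys_insert_of_not_contains d v (by simpa using hc),
      PySem.Set.add_of_not_mem (fun hm => hc ((PySem.Dict.contains_iff_mem_keys d k).mpr hm))]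

theorem minimaRowKeys (array : List (List Int)) (r : Int) :
    ∀ (L : List (Int × Int)) (d : PySem.Dict (Int × Int) Int),
      (L.foldl (fun d q => if pyA_is_minima r q.1 array then d.insert (r, q.1) q.2 else d) d).keys
        = PySem.Set.update d.keys
            ((L.filter (fun q => pyA_is_minima r q.1 array)).map (fun q => (r, q.1))) := by
  intro L
  induction L with
  | nil => intro d; simp [PySem.Set.update_nil]
  | cons a L ih =>
    intro d
    rw [List.foldl_cons]
    by_cases ht : pyA_is_minima r a.1 array = true
    · have hfa : List.filter (fun q => pyA_is_minima r q.1 array) (a :: L)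
          = a :: List.filter (fun q => pyA_is_minima r q.1 array) L :=
        List.filter_cons_of_pos ht
      rw [if_pos ht, ih, keys_insert_eq_add, hfa, List.map_cons, PySem.Set.update_cons]
    · have hfa : List.filter (fun q => pyA_is_minima r q.1 array) (a :: L)
          = List.filter (fun q => pyA_is_minima r q.1 array) L :=
        List.filter_cons_of_neg (by simpa using ht)
      rw [if_neg ht, ih, hfa]

theorem minimaKeys (array : List (List Int)) :
    ∀ (l : List (Int × List Int)) (d : PySem.Dict (Int × Int) Int),
      ((l.foldl (fun d p => (PySem.List.enumerate p.2).foldl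
          (fun d q => if pyA_is_minima p.1 q.1 array then d.insert (p.1, q.1) q.2 else d) d) d)).keys
        = PySem.Set.update d.keys (l.flatMap (pvRowMinima array)) := by
  intro l
  induction l with
  | nil => intro d; simp [PySem.Set.update_nil]
  | cons a l ih =>
    intro d
    rw [List.foldl_cons, ih, List.flatMap_cons, PySem.Set.update_append, minimaRowKeys]
    rfl

theorem find_minima_keys (array : List (List Int)) :
    (pyA_find_minima array).keys = PySem.Set.ofList (pvMinimaList array) := by
  unfold pyA_find_minima pvMinimaList
  rw [minimaKeys, PySem.Dict.keys_empty]
  rfl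

theorem mem_rowMinima_fst (array : List (List Int)) (p : Int × List Int) (a : Int × Int)
    (ha : a ∈ pvRowMinima array p) : a.1 = p.1 := by
  unfold pvRowMinima at ha
  obtain ⟨q, _, rfl⟩ := List.mem_map.mp ha
  rfl

theorem rowMinima_nodup (array : List (List Int)) (p : Int × List Int) :
    (pvRowMinima array p).Nodup := by
  unfold pvRowMinima
  have hpw := PySem.List.pairwise_lt_enumerate p.2 0
  refine List.Pairwise.map _ ?_ (hpw.filter _)
  intro a b hab he
  exact absurd (congrArg Prod.snd he) (by simpa using Int.ne_of_lt hab)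

theorem minimaList_nodup_aux (array : List (List Int)) :
    ∀ (xs : List (List Int)) (s : Int),
      ((PySem.List.enumerate xs s).flatMap (pvRowMinima array)).Nodup := by
  intro xs
  induction xs with
  | nil => intro s; simp [PySem.List.enumerate]
  | cons x xs ih =>
    intro s
    rw [PySem.List.enumerate_cons, List.flatMap_cons]
    refine List.nodup_append.mpr ⟨rowMinima_nodup array (s, x), ih (s + 1), ?_⟩
    intro a ha b hb
    have ha1 : a.1 = s := mem_rowMinima_fst array (s, x) a ha
    obtain ⟨p, hp, hbp⟩ := List.mem_flatMap.mp hb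
    have hb1 : b.1 = p.1 := mem_rowMinima_fst array p b hbp
    obtain ⟨k, hk, rfl⟩ := (PySem.List.mem_enumerate_iff xs (s + 1) p).mp hp
    intro he
    rw [he] at ha1
    simp at hb1
    omega

theorem minimaList_nodup (array : List (List Int)) : (pvMinimaList array).Nodup :=
  minimaList_nodup_aux array array 0

-- ---- the common canonical form ----
def pvDedupAppend (acc : List (List (Int × Int))) (basin : List (Int × Int)) :
    List (List (Int × Int)) :=
  if acc.any (fun b => PySem.Set.equal b basin) then acc else acc ++ [basin]

def pvCanon (array : List (List Int)) : List (List (Int × Int)) :=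
  (pvMinimaList array).foldl (fun acc m => pvDedupAppend acc
    (pyB_bfs array (PySem.List.len array) (PySem.List.len (PySem.List.pyGetD array 0 [])) m)) []

theorem A_eq_canon (array : List (List Int)) : find_all_basins array = pvCanon array := by
  simp only [find_all_basins]
  rw [find_minima_keys, PySem.Set.ofList_eq_self_of_nodup _ (minimaList_nodup array)]
  simp only [basin_eq, pvCanon, pvDedupAppend]

theorem minima_test_eq (array : List (List Int)) (p : Int × List Int)
    (hp : p ∈ PySem.List.enumerate array) (q : Int × Int)
    (hq : q ∈ PySem.List.enumerate p.2) :
    ([pyB_value array (PySem.List.len array) (PySem.List.len (PySem.List.pyGetD array 0 []))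
        (p.1 - 1) q.1,
      pyB_value array (PySem.List.len array) (PySem.List.len (PySem.List.pyGetD array 0 []))
        p.1 (q.1 - 1),
      pyB_value array (PySem.List.len array) (PySem.List.len (PySem.List.pyGetD array 0 []))
        p.1 (q.1 + 1),
      pyB_value array (PySem.List.len array) (PySem.List.len (PySem.List.pyGetD array 0 []))
        (p.1 + 1) q.1].all
        (fun nv => match nv with
          | none => true
          | some n => decide (q.2 < n)))
      = pyA_is_minima p.1 q.1 array := by
  obtain ⟨k, hk, rfl⟩ := (PySem.List.mem_enumerate_iff array 0 p).mp hp
  obtain ⟨j, hj, rfl⟩ := (PySem.List.mem_enumerate_iff _ 0 q).mp hq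
  simp only [pyA_is_minima, value_eq]
  have hval : PySem.List.pyGetD (PySem.List.pyGetD array (0 + (k : Int)) []) (0 + (j : Int)) 0
      = array[k][j] := by
    rw [zero_add, zero_add, PySem.List.pyGetD_natCast, PySem.List.pyGetD_natCast,
      List.getD_eq_getElem _ _ hk]
    exact List.getD_eq_getElem _ _ (by simpa using hj)
  rw [hval]

theorem foldl_flatMap_basins (array : List (List Int)) (G : List (List (Int × Int)) → (Int × Int) → List (List (Int × Int))) :
    ∀ (l : List (Int × List Int)) (acc : List (List (Int × Int))),
      l.foldl (fun acc p => (pvRowMinima array p).foldl G acc) acc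
        = (l.flatMap (pvRowMinima array)).foldl G acc := by
  intro l
  induction l with
  | nil => intro acc; rfl
  | cons a l ih =>
    intro acc
    rw [List.foldl_cons, List.flatMap_cons, List.foldl_append, ih]

theorem B_eq_canon (array : List (List Int)) : find_all_basins_alt array = pvCanon array := by
  simp only [find_all_basins_alt, widthExpr_eq]
  unfold pvCanon pvMinimaList
  rw [← foldl_flatMap_basins]
  have houter : ∀ (l : List (Int × List Int)), (∀ p ∈ l, p ∈ PySem.List.enumerate array) →
      ∀ acc, l.foldl (fun all_basins p => (PySem.List.enumerate p.2).foldl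
          (fun all_basins q =>
            if [pyB_value array (PySem.List.len array)
                  (PySem.List.len (PySem.List.pyGetD array 0 [])) (p.1 - 1) q.1,
                pyB_value array (PySem.List.len array)
                  (PySem.List.len (PySem.List.pyGetD array 0 [])) p.1 (q.1 - 1),
                pyB_value array (PySem.List.len array)
                  (PySem.List.len (PySem.List.pyGetD array 0 [])) p.1 (q.1 + 1),
                pyB_value array (PySem.List.len array)
                  (PySem.List.len (PySem.List.pyGetD array 0 [])) (p.1 + 1) q.1].all
                  (fun nv => match nv with
                    | none => true
                    | some n => decide (q.2 < n)) then
              (fun basin => if all_basins.any (fun b => PySem.Set.equal b basin) then all_basins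
                else all_basins ++ [basin])
                (pyB_bfs array (PySem.List.len array)
                  (PySem.List.len (PySem.List.pyGetD array 0 [])) (p.1, q.1))
            else all_basins) all_basins) acc
        = l.foldl (fun acc p => (pvRowMinima array p).foldl (fun acc m => pvDedupAppend acc
            (pyB_bfs array (PySem.List.len array)
              (PySem.List.len (PySem.List.pyGetD array 0 [])) m)) acc) acc := by
    intro l
    induction l with
    | nil => intro _ acc; rfl
    | cons a l ih =>
      intro hl acc
      rw [List.foldl_cons, List.foldl_cons]
      have hinner : ∀ (L : List (Int × Int)), (∀ q ∈ L, q ∈ PySem.List.enumerate a.2) →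
          ∀ acc2, L.foldl (fun all_basins q =>
              if [pyB_value array (PySem.List.len array)
                    (PySem.List.len (PySem.List.pyGetD array 0 [])) (a.1 - 1) q.1,
                  pyB_value array (PySem.List.len array)
                    (PySem.List.len (PySem.List.pyGetD array 0 [])) a.1 (q.1 - 1),
                  pyB_value array (PySem.List.len array)
                    (PySem.List.len (PySem.List.pyGetD array 0 [])) a.1 (q.1 + 1),
                  pyB_value array (PySem.List.len array)
                    (PySem.List.len (PySem.List.pyGetD array 0 [])) (a.1 + 1) q.1].all
                    (fun nv => match nv with
                      | none => true
                      | some n => decide (q.2 < n)) then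
                (fun basin => if all_basins.any (fun b => PySem.Set.equal b basin) then all_basins
                  else all_basins ++ [basin])
                  (pyB_bfs array (PySem.List.len array)
                    (PySem.List.len (PySem.List.pyGetD array 0 [])) (a.1, q.1))
              else all_basins) acc2
            = (((L.filter (fun q => pyA_is_minima a.1 q.1 array))).map (fun q => (a.1, q.1))).foldl
                (fun acc m => pvDedupAppend acc
                  (pyB_bfs array (PySem.List.len array)
                    (PySem.List.len (PySem.List.pyGetD array 0 [])) m)) acc2 := by
        intro L
        induction L with
        | nil => intro _ acc2; rfl
        | cons b L ihL =>
          intro hL acc2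
          rw [List.foldl_cons]
          rw [minima_test_eq array a (hl a List.mem_cons_self) b (hL b List.mem_cons_self)]
          by_cases hb : pyA_is_minima a.1 b.1 array = true
          · have hfa : List.filter (fun q => pyA_is_minima a.1 q.1 array) (b :: L)
                = b :: List.filter (fun q => pyA_is_minima a.1 q.1 array) L :=
              List.filter_cons_of_pos hb
            rw [if_pos hb, hfa, List.map_cons, List.foldl_cons,
              ihL (fun q hq => hL q (List.mem_cons_of_mem b hq))]
            rfl
          · have hfa : List.filter (fun q => pyA_is_minima a.1 q.1 array) (b :: L)
                = List.filter (fun q => pyA_is_minima a.1 q.1 array) L :=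
              List.filter_cons_of_neg (by simpa using hb)
            rw [if_neg hb, hfa, ihL (fun q hq => hL q (List.mem_cons_of_mem b hq))]
      rw [hinner (PySem.List.enumerate a.2) (fun q hq => hq)]
      exact ih (fun p hp => hl p (List.mem_cons_of_mem a hp)) _
  exact houter (PySem.List.enumerate array) (fun p hp => hp) []

-- ===== VERDICT (by name: the statement is the Claim_ definition above) =====
theorem find_all_basins_spec : Claim_equal_find_all_basins := by
  intro array _ _
  unfold Spec_find_all_basins
  rw [A_eq_canon, B_eq_canon]
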